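-- pv_equiv track=rewrite | github.com/Alekselion/algorithms | grokking-algorithms/3_recursion.py | custom_max
-- ===== SOURCE A (Python) =====
-- def custom_max(arr):
--     """Return maximum item from arr.
--     """
--     if len(arr) == 0:
--         return 0
--     elif len(arr) == 1:
--         return arr[0]
--     else:
--         submax = custom_max(arr[1:])
--         return arr[0] if arr[0] > submax else submax
-- ===== SOURCE B (Python) =====
-- def custom_max(arr):
--     """Return maximum item from arr (0 if empty), with an explicit loop."""
--     if not arr:
--         return 0
--     m = arr[0]
--     for x in arr[1:]:
--         if x > m:
--             m = x
--     return m
-- ===== Notes on version B (the rewrite author's own statement) =====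
-- stated objective: faster
-- what changed: Replaced the recursion over arr[1:] (which copies the list at every level, quadratic overall) with a single iterative pass maintaining a running maximum.
import Mathlib
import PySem

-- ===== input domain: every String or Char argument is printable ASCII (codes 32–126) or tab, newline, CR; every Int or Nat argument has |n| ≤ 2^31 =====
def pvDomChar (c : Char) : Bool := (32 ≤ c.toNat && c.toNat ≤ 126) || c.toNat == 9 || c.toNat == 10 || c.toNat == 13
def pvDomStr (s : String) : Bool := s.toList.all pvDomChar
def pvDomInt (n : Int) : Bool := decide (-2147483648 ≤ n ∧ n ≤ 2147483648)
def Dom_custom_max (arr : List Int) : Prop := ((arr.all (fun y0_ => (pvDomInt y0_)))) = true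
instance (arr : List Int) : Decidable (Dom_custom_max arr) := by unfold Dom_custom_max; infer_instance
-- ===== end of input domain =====

-- B replaces A's recursion over arr[1:] with one explicit loop keeping a running maximum (simpler).

-- ===== PORT A =====
def custom_max (arr : List Int) : Int :=
  match arr with
  | [] => 0
  | [x] => x
  | x :: rest =>
      let submax := custom_max rest
      if x > submax then x else submax

-- ===== PORT B =====
def custom_max_alt (arr : List Int) : Int :=
  match arr with
  | [] => 0
  | x :: rest => rest.foldl (fun m y => if y > m then y else m) x

-- ===== PRECONDITION & SPEC =====
def Spec_custom_max (arr : List Int) (out : Int) : Prop := out = custom_max_alt arr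
instance (arr : List Int) (out : Int) : Decidable (Spec_custom_max arr out) := by unfold Spec_custom_max; infer_instance

-- ===== CLAIM (what is proved, stated in full; the proofs are below) =====
def Claim_equal_custom_max : Prop := ∀ (arr : List Int), Dom_custom_max arr → Spec_custom_max arr (custom_max arr)

-- ===== LEMMAS AND PROOFS =====
theorem custom_max_swap (x y : Int) (t : List Int) :
    custom_max (x :: y :: t) = custom_max ((if y > x then y else x) :: t) := by
  cases t with
  | nil => simp only [custom_max]; split_ifs <;> omega
  | cons c u =>
      simp only [custom_max]
      split_ifs <;> omega

theorem custom_max_foldl (rest : List Int) (x : Int) :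
    rest.foldl (fun m y => if y > m then y else m) x = custom_max (x :: rest) := by
  induction rest generalizing x with
  | nil => simp [custom_max]
  | cons y t ih =>
      rw [List.foldl_cons, ih, custom_max_swap]

-- ===== VERDICT (by name: the statement is the Claim_ definition above) =====
theorem custom_max_spec : Claim_equal_custom_max := by
  intro arr _
  unfold Spec_custom_max
  cases arr with
  | nil => rfl
  | cons x rest => exact (custom_max_foldl rest x).symm
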